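-- pv_equiv track=rewrite | github.com/Lemi-in/Codeforces-daily | Diet Plan Performance.py | dieter
-- ===== SOURCE A (Python) =====
-- def dieter(cal, k , l , u):
--     n = len(cal)
--     left = 0
--     sm = 0
--     T = 0
--     for right in range(n):
--         sm += cal[right]
--         if right - left + 1 > k:
--             sm -= cal[left]
--             left += 1
--         if right - left + 1 == k:
--             if sm > u:
--                 T += 1
--             elif sm < l:
--                 T -= 1
--     return T
-- ===== SOURCE B (Python) =====
-- def dieter(cal, k, l, u):
--     n = len(cal)
--     P = [0]
--     for c in cal:
--         P.append(P[-1] + c)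
--     T = 0
--     for i in range(n - k + 1):
--         s = P[i + k] - P[i]
--         if s > u:
--             T += 1
--         elif s < l:
--             T -= 1
--     return T
-- ===== Notes on version B (the rewrite author's own statement) =====
-- stated objective: alternative
-- what changed: Replaces the two-pointer sliding window with running sum by a prefix-sum table built once, each window sum then obtained by differencing P[i+k]-P[i] in a single index loop.
-- outside the precondition, e.g. on dieter([5], 0, 0, -1): A returns 1, B returns 2; on dieter([5], -1, 0, 10): A returns 0, B raises IndexError
import Mathlib
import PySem

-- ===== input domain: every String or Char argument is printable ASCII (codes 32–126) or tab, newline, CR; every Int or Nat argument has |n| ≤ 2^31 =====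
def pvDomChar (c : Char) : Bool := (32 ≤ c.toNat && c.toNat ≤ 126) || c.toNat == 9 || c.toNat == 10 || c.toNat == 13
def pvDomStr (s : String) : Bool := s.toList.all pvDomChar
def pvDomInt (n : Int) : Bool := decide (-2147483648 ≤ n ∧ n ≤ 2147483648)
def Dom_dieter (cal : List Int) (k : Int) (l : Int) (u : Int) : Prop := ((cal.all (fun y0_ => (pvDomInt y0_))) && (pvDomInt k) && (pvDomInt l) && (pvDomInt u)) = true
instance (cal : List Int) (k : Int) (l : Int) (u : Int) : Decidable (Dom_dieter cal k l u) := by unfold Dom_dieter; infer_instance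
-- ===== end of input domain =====

-- B replaces the sliding window (running sum, two pointers) by a prefix-sum table differenced per window; alternative decomposition, same cost.

-- ===== PORT A =====
-- literal transliteration of A: state (left, sm, T) over 'for right in range(n)';
-- cal[right] / cal[left] are always in range here, so pyGetD is exact.
def dieter (cal : List Int) (k : Int) (l : Int) (u : Int) : Int :=
  let n : Int := cal.length
  let st := (PySem.List.pyRange 0 n 1).foldl
    (fun (st : Int × Int × Int) right =>
      let left := st.1
      let sm := st.2.1
      let T := st.2.2
      let sm := sm + PySem.List.pyGetD cal right 0
      let p : Int × Int :=
        if right - left + 1 > k then (sm - PySem.List.pyGetD cal left 0, left + 1)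
        else (sm, left)
      let sm := p.1
      let left := p.2
      let T :=
        if right - left + 1 = k then
          (if sm > u then T + 1 else if sm < l then T - 1 else T)
        else T
      (left, sm, T))
    (0, 0, 0)
  st.2.2

-- ===== PORT B =====
-- literal transliteration of Source B: build prefix list P (append P[-1]+c), then
-- difference P[i+k]-P[i] over range(n-k+1); P[-1] is exact (P never empty),
-- P[i+k]/P[i] are in range on Pre_ (k ≥ 1), so pyGetD is exact there.
def dieter_alt (cal : List Int) (k : Int) (l : Int) (u : Int) : Int :=
  let n : Int := cal.length
  let P : List Int := cal.foldl (fun P c => P ++ [PySem.List.pyGetD P (-1) 0 + c]) [0]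
  (PySem.List.pyRange 0 (n - k + 1) 1).foldl
    (fun T i =>
      let s := PySem.List.pyGetD P (i + k) 0 - PySem.List.pyGetD P i 0
      if s > u then T + 1 else if s < l then T - 1 else T)
    0

-- ===== PRECONDITION & SPEC =====
-- Pre_ excludes non-positive window lengths k ≤ 0, a degenerate corner nobody would
-- specify: there A's sliding bookkeeping accidentally scores n empty windows (k = 0)
-- or nothing (k < 0), while B's prefix differencing scores n+1 empty windows or raises
-- IndexError via out-of-range negative indices.
def Pre_dieter (cal : List Int) (k : Int) (l : Int) (u : Int) : Prop := 1 ≤ k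
instance (cal : List Int) (k : Int) (l : Int) (u : Int) : Decidable (Pre_dieter cal k l u) := by unfold Pre_dieter; infer_instance
def pvWitness_dieter : List Int × Int × Int × Int := ([1, 5, 2, 4], 2, 3, 8)
def Spec_dieter (cal : List Int) (k : Int) (l : Int) (u : Int) (out : Int) : Prop := out = dieter_alt cal k l u
instance (cal : List Int) (k : Int) (l : Int) (u : Int) (out : Int) : Decidable (Spec_dieter cal k l u out) := by unfold Spec_dieter; infer_instance

-- ===== CLAIM (what is proved, stated in full; the proofs are below) =====
def Claim_equal_dieter : Prop := ∀ (cal : List Int) (k : Int) (l : Int) (u : Int), Dom_dieter cal k l u → Pre_dieter cal k l u → Spec_dieter cal k l u (dieter cal k l u)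

-- ===== LEMMAS AND PROOFS =====

-- prefix sum of the first j elements
def pvPfx (cal : List Int) (j : Nat) : Int := ((cal.take j).sum : Int)

-- the score of one window sum
def pvScore (l u s : Int) : Int := if s > u then 1 else if s < l then -1 else 0

theorem pvPfx_succ (cal : List Int) (m : Nat) (h : m < cal.length) :
    pvPfx cal (m + 1) = pvPfx cal m + cal.getD m 0 := by
  rw [pvPfx, pvPfx, List.sum_take_succ _ _ h]
  simp [List.getD, List.getElem?_eq_getElem h]

-- B's first loop builds the prefix-sum table
theorem pvBuildP (xs : List Int) : ∀ (acc : List Int) (v : Int),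
    xs.foldl (fun P c => P ++ [PySem.List.pyGetD P (-1) 0 + c]) (acc ++ [v])
    = acc ++ [v] ++ (List.range xs.length).map (fun j => v + (xs.take (j+1)).sum) := by
  induction xs with
  | nil => intro acc v; simp
  | cons x xs ih =>
    intro acc v
    have h1 : PySem.List.pyGetD (acc ++ [v]) (-1) 0 = v :=
      PySem.List.pyGetD_neg_one_append_singleton acc v 0
    simp only [List.foldl_cons, h1]
    rw [ih (acc ++ [v]) (v + x), List.length_cons, List.range_succ_eq_map]
    simp [List.map_map, Function.comp_def, add_assoc]

-- fold of the score-accumulating loop body is a sum of scores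
theorem pvFoldScore (l u : Int) (f : Nat → Int) : ∀ (m : Nat) (init : Int),
    (List.range m).foldl (fun T j => if f j > u then T + 1 else if f j < l then T - 1 else T) init
    = init + ((List.range m).map (fun j => pvScore l u (f j))).sum := by
  intro m
  induction m with
  | zero => intro init; simp
  | succ m ih =>
    intro init
    rw [List.range_succ]
    simp only [List.foldl_append, List.foldl_cons, List.foldl_nil, List.map_append,
      List.map_cons, List.map_nil, List.sum_append, List.sum_cons, List.sum_nil, ih]
    unfold pvScore
    split_ifs <;> ring

-- the if/elif update is addition of pvScore
theorem pvIfScore (l u s T : Int) :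
    (if s > u then T + 1 else if s < l then T - 1 else T) = T + pvScore l u s := by
  unfold pvScore; split_ifs <;> ring

-- B computes the sum of window scores
theorem pvB_eq (cal : List Int) (kn : Nat) (hk : 1 ≤ kn) (l u : Int) :
    dieter_alt cal (kn : Int) l u
    = ((List.range (cal.length + 1 - kn)).map
        (fun i => pvScore l u (pvPfx cal (i + kn) - pvPfx cal i))).sum := by
  have hP : cal.foldl (fun P c => P ++ [PySem.List.pyGetD P (-1) 0 + c]) [0]
      = (List.range (cal.length + 1)).map (pvPfx cal) := by
    have h := pvBuildP cal [] 0
    simp only [List.nil_append] at h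
    rw [h, List.range_succ_eq_map]
    simp [pvPfx, List.map_map, Function.comp_def]
  simp only [dieter_alt, hP]
  rw [PySem.List.pyRange_one]
  have hN : ((cal.length : Int) - (kn : Int) + 1 - 0).toNat = cal.length + 1 - kn := by omega
  rw [hN, List.foldl_map]
  rw [pvFoldScore l u
    (fun j => PySem.List.pyGetD ((List.range (cal.length + 1)).map (pvPfx cal)) ((0 + (j : Int)) + (kn : Int)) 0
            - PySem.List.pyGetD ((List.range (cal.length + 1)).map (pvPfx cal)) (0 + (j : Int)) 0)]
  rw [zero_add]
  congr 1
  refine List.map_congr_left ?_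
  intro j hj
  rw [List.mem_range] at hj
  have h1 : (0 : Int) + (j : Int) + (kn : Int) = ((j + kn : Nat) : Int) := by push_cast; ring
  have h2 : (0 : Int) + (j : Int) = ((j : Nat) : Int) := by push_cast; ring
  rw [h1, h2, PySem.List.pyGetD_natCast, PySem.List.pyGetD_natCast]
  have hjk : j + kn < cal.length + 1 := by omega
  have hjl : j < cal.length + 1 := by omega
  rw [List.getD_eq_getElem _ _ (by simpa using hjk), List.getD_eq_getElem _ _ (by simpa using hjl)]
  simp

-- A's loop body, named for the invariant proof (identical to the lambda in `dieter`)
def pvStepA (cal : List Int) (k l u : Int) (st : Int × Int × Int) (right : Int) : Int × Int × Int :=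
  let left := st.1
  let sm := st.2.1
  let T := st.2.2
  let sm := sm + PySem.List.pyGetD cal right 0
  let p : Int × Int :=
    if right - left + 1 > k then (sm - PySem.List.pyGetD cal left 0, left + 1)
    else (sm, left)
  let sm := p.1
  let left := p.2
  let T :=
    if right - left + 1 = k then
      (if sm > u then T + 1 else if sm < l then T - 1 else T)
    else T
  (left, sm, T)

-- invariant of A's sliding-window loop after m iterations
theorem pvAinv (cal : List Int) (kn : Nat) (hk : 1 ≤ kn) (l u : Int) :
    ∀ m : Nat, m ≤ cal.length →
    (PySem.List.pyRange 0 (m : Int) 1).foldl (pvStepA cal (kn : Int) l u) (0, 0, 0)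
    = (((m - kn : Nat) : Int), pvPfx cal m - pvPfx cal (m - kn),
       ((List.range (m + 1 - kn)).map (fun i => pvScore l u (pvPfx cal (i + kn) - pvPfx cal i))).sum) := by
  intro m
  induction m with
  | zero =>
    intro _
    have h0 : 1 - kn = 0 := by omega
    rw [PySem.List.pyRange_one_eq_nil (by omega)]
    simp [h0, pvPfx]
  | succ m ih =>
    intro hm
    have hcast : ((m + 1 : Nat) : Int) = (m : Int) + 1 := by omega
    rw [hcast, PySem.List.pyRange_one_succ_right (by omega), List.foldl_append,
      ih (by omega), List.foldl_cons, List.foldl_nil]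
    unfold pvStepA
    simp only [PySem.List.pyGetD_natCast]
    have hmlen : m < cal.length := by omega
    have hpm := pvPfx_succ cal m hmlen
    by_cases hmk : kn ≤ m
    · -- window already full before this step: slide
      have hc1 : ((m : Int) - ((m - kn : Nat) : Int) + 1 > (kn : Int)) := by omega
      rw [if_pos hc1]
      dsimp only
      have hc2 : (m : Int) - (((m - kn : Nat) : Int) + 1) + 1 = (kn : Int) := by omega
      rw [if_pos hc2, pvIfScore]
      have hm2 : m - kn < cal.length := by omega
      have hpmk := pvPfx_succ cal (m - kn) hm2
      have e2 : m - kn + 1 = m + 1 - kn := by omega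
      have e3 : m + 1 + 1 - kn = (m + 1 - kn) + 1 := by omega
      have e4 : (m + 1 - kn) + kn = m + 1 := by omega
      have hsm : pvPfx cal m - pvPfx cal (m - kn) + cal.getD m 0 - cal.getD (m - kn) 0
          = pvPfx cal (m + 1) - pvPfx cal (m + 1 - kn) := by
        rw [← e2, hpm, hpmk]; ring
      rw [Prod.mk.injEq, Prod.mk.injEq]
      refine ⟨by omega, hsm, ?_⟩
      rw [hsm, e3, List.range_succ, List.map_append, List.sum_append]
      simp [e4]
    · -- window not yet full: no slide
      have hc1 : ¬ ((m : Int) - ((m - kn : Nat) : Int) + 1 > (kn : Int)) := by omega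
      rw [if_neg hc1]
      dsimp only
      have hz : m - kn = 0 := by omega
      by_cases hfull : m + 1 = kn
      · have hc2 : (m : Int) - ((m - kn : Nat) : Int) + 1 = (kn : Int) := by omega
        rw [if_pos hc2, pvIfScore]
        have h1 : m + 1 - kn = 0 := by omega
        have h2 : m + 1 + 1 - kn = 1 := by omega
        have hsm : pvPfx cal m - pvPfx cal (m - kn) + cal.getD m 0
            = pvPfx cal (m + 1) - pvPfx cal (m + 1 - kn) := by
          rw [hz, h1, hpm]; ring
        rw [Prod.mk.injEq, Prod.mk.injEq]
        refine ⟨by omega, hsm, ?_⟩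
        rw [hsm, h1, h2]
        simp [hfull]
      · have hc2 : ¬ ((m : Int) - ((m - kn : Nat) : Int) + 1 = (kn : Int)) := by omega
        rw [if_neg hc2]
        have h1 : m + 1 - kn = 0 := by omega
        have h2 : m + 1 + 1 - kn = 0 := by omega
        have hsm : pvPfx cal m - pvPfx cal (m - kn) + cal.getD m 0
            = pvPfx cal (m + 1) - pvPfx cal (m + 1 - kn) := by
          rw [hz, h1, hpm]; ring
        rw [Prod.mk.injEq, Prod.mk.injEq]
        exact ⟨by omega, hsm, by rw [h1, h2]⟩

theorem dieter_spec : Claim_equal_dieter := by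
  intro cal k l u _ hpre
  unfold Pre_dieter at hpre
  unfold Spec_dieter
  have hk : k = (k.toNat : Int) := (Int.toNat_of_nonneg (by omega)).symm
  have hkn : 1 ≤ k.toNat := by omega
  rw [hk]
  have hA : dieter cal ((k.toNat : Nat) : Int) l u
      = ((PySem.List.pyRange 0 (cal.length : Int) 1).foldl
          (pvStepA cal ((k.toNat : Nat) : Int) l u) (0, 0, 0)).2.2 := rfl
  rw [hA, pvAinv cal k.toNat hkn l u cal.length le_rfl, pvB_eq cal k.toNat hkn l u]
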